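-- pv_equiv track=rewrite | github.com/sanglim00/algorithm-solved | 백준/Gold/17609. 회문/회문.py | checkStr
-- ===== SOURCE A (Python) =====
-- def checkStr(str_, i, j):
--     ans = 1
--
--     while i < j:
--         if str_[i] == str_[j]:
--             i+=1
--             j-=1
--         else:
--             ans = 2
--             break
--
--     return ans
-- ===== SOURCE B (Python) =====
-- def checkStr(str_, i, j):
--     s = str_[i:j+1]
--     return 1 if s == s[::-1] else 2
-- ===== Notes on version B (the rewrite author's own statement) =====
-- stated objective: idiomatic
-- what changed: Replaced the inward two-pointer while-loop with slicing out the substring once and comparing it to its reverse, the standard Python palindrome idiom.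
-- outside the precondition, e.g. on checkStr('aba', -1, 2): A returns 2, B returns 1; on checkStr('abc', 0, -2): A returns 1, B returns 2
import Mathlib
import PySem

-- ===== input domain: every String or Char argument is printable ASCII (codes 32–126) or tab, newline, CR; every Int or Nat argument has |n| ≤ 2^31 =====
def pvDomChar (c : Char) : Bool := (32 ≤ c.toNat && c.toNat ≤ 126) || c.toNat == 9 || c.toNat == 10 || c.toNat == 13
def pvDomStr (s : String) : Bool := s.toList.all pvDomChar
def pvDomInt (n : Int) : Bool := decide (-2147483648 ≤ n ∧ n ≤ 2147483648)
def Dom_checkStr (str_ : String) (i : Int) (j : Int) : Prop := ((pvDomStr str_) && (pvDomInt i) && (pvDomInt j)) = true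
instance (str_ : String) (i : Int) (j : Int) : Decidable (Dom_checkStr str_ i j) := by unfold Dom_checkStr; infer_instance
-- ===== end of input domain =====

-- B replaces A's inward two-pointer scan by slicing out the substring and comparing it with its
-- reverse (idiomatic Python); equivalence is claimed on the task's natural domain of non-negative
-- indices, where the return values are exact.

-- ===== PORT A =====
-- while i < j: compare str_[i], str_[j]; on mismatch answer 2, else move both pointers inward.
def checkStrLoop (cs : List Char) (i : Int) (j : Int) : Int :=
  if _h : i < j then
    match PySem.List.pyGet? cs i, PySem.List.pyGet? cs j with
    | some a, some b => if a == b then checkStrLoop cs (i + 1) (j - 1) else 2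
    | _, _ => 0   -- IndexError in Python; unreachable under Pre_checkStr
  else 1
termination_by (j - i).toNat
decreasing_by omega

def checkStr (str_ : String) (i : Int) (j : Int) : Int :=
  checkStrLoop str_.toList i j

-- ===== PORT B =====
-- s = str_[i:j+1]; 1 if s == s[::-1] else 2   (s[::-1] is reverse: PySem.List.slice?_none_none_neg_one)
def checkStr_alt (str_ : String) (i : Int) (j : Int) : Int :=
  let s := PySem.List.slice str_.toList (some i) (some (j + 1))
  if s = s.reverse then 1 else 2

-- ===== PRECONDITION & SPEC =====
-- Pre_ restricts to the task's natural domain plus every corner where the claim can be exact: it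
-- excludes i < j with j out of range, where A raises IndexError, and the inputs with a negative
-- index selecting a window of length ≥ 2, where A's negative-index wraparound and B's slice
-- semantics are two accidental readings of an input the task never produces.
def Pre_checkStr (str_ : String) (i : Int) (j : Int) : Prop :=
  (i < j → 0 ≤ i ∧ j < (str_.toList.length : Int)) ∧
  (j ≤ i → (-1 ≤ j ∨ i < 0 ∨ (str_.toList.length : Int) ≤ i ∨
            j + (str_.toList.length : Int) ≤ i))
instance (str_ : String) (i : Int) (j : Int) : Decidable (Pre_checkStr str_ i j) := by
  unfold Pre_checkStr; infer_instance

def pvWitness_checkStr : String × Int × Int := ("abcba", 0, 4)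

def Spec_checkStr (str_ : String) (i : Int) (j : Int) (out : Int) : Prop := out = checkStr_alt str_ i j
instance (str_ : String) (i : Int) (j : Int) (out : Int) : Decidable (Spec_checkStr str_ i j out) := by
  unfold Spec_checkStr; infer_instance

-- ===== CLAIM (what is proved, stated in full; the proofs are below) =====
def Claim_equal_checkStr : Prop := ∀ (str_ : String) (i : Int) (j : Int), Dom_checkStr str_ i j → Pre_checkStr str_ i j → Spec_checkStr str_ i j (checkStr str_ i j)

-- ===== LEMMAS AND PROOFS =====

-- clampIdx evaluated as closed-form Int/Nat arithmetic
theorem clampIdx_eval (n : Nat) (a : Int) :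
    PySem.List.clampIdx n a = if 0 ≤ a then min a.toNat n else n - (-a).toNat := by
  by_cases h : 0 ≤ a
  · rw [if_pos h]
    have ha : a = ((a.toNat : Nat) : Int) := by omega
    rw [ha, PySem.List.clampIdx_natCast]
    omega
  · rw [if_neg h]
    have hk : 0 < (-a).toNat := by omega
    have ha : a = -(((-a).toNat : Nat) : Int) := by omega
    conv_lhs => rw [ha, PySem.List.clampIdx_neg_natCast _ _ hk]

-- a list of length ≤ 1 equals its reverse
theorem rev_short {α : Type} (l : List α) (h : l.length ≤ 1) : l = l.reverse := by
  match l, h with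
  | [], _ => rfl
  | [a], _ => rfl

-- palindrome decomposition: x :: m ++ [y] is a palindrome iff x = y and m is
theorem pal_cons_append {α : Type} (x y : α) (m : List α) :
    (x :: (m ++ [y]) = (x :: (m ++ [y])).reverse) ↔ (x = y ∧ m = m.reverse) := by
  constructor
  · intro h
    have h' : x :: (m ++ [y]) = y :: (m.reverse ++ [x]) := by simpa using h
    injection h' with h1 h2
    subst h1
    exact ⟨rfl, List.append_cancel_right h2⟩
  · rintro ⟨rfl, hm⟩
    conv_lhs => rw [hm]
    simp

-- slice decomposition for a < b < n (over Nat)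
theorem slice_decomp (cs : List Char) (a b : Nat) (hab : a < b) (hb : b < cs.length) :
    (cs.drop a).take (b + 1 - a) =
      cs[a] :: ((cs.drop (a + 1)).take (b - a - 1) ++ [cs[b]]) := by
  have ha : a < cs.length := lt_trans hab hb
  rw [List.drop_eq_getElem_cons ha]
  have h1 : b + 1 - a = (b - a - 1 + 1) + 1 := by omega
  rw [h1, List.take_succ_cons]
  congr 1
  rw [List.take_add_one]
  congr 1
  rw [List.getElem?_drop]
  have h2 : a + 1 + (b - a - 1) = b := by omega
  rw [h2, List.getElem?_eq_getElem hb]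
  rfl

-- main loop characterisation on the natural domain (induction on the pointer gap)
theorem loop_eq_slice_aux (cs : List Char) (fuel : Nat) : ∀ i j : Int,
    (j - i).toNat = fuel → 0 ≤ i → 0 ≤ j → (i < j → j < (cs.length : Int)) →
    checkStrLoop cs i j =
      (if (cs.drop i.toNat).take ((j + 1).toNat - i.toNat) =
          ((cs.drop i.toNat).take ((j + 1).toNat - i.toNat)).reverse then 1 else 2) := by
  induction fuel using Nat.strong_induction_on with
  | _ fuel ih =>
    intro i j hfuel hi hj hjn
    by_cases hij : i < j
    · have hjlt : j < (cs.length : Int) := hjn hij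
      have hjlt' : j.toNat < cs.length := by omega
      have hab : i.toNat < j.toNat := by omega
      have hgi : PySem.List.pyGet? cs i = some cs[i.toNat] :=
        PySem.List.pyGet?_eq_some_getElem cs hi (by omega)
      have hgj : PySem.List.pyGet? cs j = some cs[j.toNat] :=
        PySem.List.pyGet?_eq_some_getElem cs hj (by omega)
      rw [checkStrLoop]; simp only [hij, dite_true, hgi, hgj]
      have hnat : (j + 1).toNat - i.toNat = j.toNat + 1 - i.toNat := by omega
      rw [hnat, slice_decomp cs i.toNat j.toNat hab hjlt']
      by_cases heq : cs[i.toNat] = cs[j.toNat]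
      · have hlt : (j - 1 - (i + 1)).toNat < fuel := by omega
        have hi1 : (0:Int) ≤ i + 1 := by omega
        have hj1 : (0:Int) ≤ j - 1 := by omega
        have hn1 : i + 1 < j - 1 → j - 1 < (cs.length : Int) := by intro _; omega
        rw [if_pos (beq_iff_eq.mpr heq),
          ih _ hlt (i + 1) (j - 1) rfl hi1 hj1 hn1]
        have e1 : (i + 1).toNat = i.toNat + 1 := by omega
        have e2 : (j - 1 + 1).toNat - (i + 1).toNat = j.toNat - i.toNat - 1 := by omega
        rw [e2, e1]
        by_cases hm : (cs.drop (i.toNat + 1)).take (j.toNat - i.toNat - 1) =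
            ((cs.drop (i.toNat + 1)).take (j.toNat - i.toNat - 1)).reverse
        · rw [if_pos hm, if_pos ((pal_cons_append _ _ _).mpr ⟨heq, hm⟩)]
        · rw [if_neg hm, if_neg (fun h => hm ((pal_cons_append _ _ _).mp h).2)]
      · rw [if_neg (fun h => heq (beq_iff_eq.mp h)),
          if_neg (fun h => heq ((pal_cons_append _ _ _).mp h).1)]
    · rw [checkStrLoop]; simp only [hij, dite_false]
      have hlen : ((cs.drop i.toNat).take ((j + 1).toNat - i.toNat)).length ≤ 1 := by
        have := List.length_take_le ((j + 1).toNat - i.toNat) (cs.drop i.toNat)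
        omega
      rw [if_pos (rev_short _ hlen)]

-- ===== VERDICT (by name: the statement is the Claim_ definition above) =====
theorem checkStr_spec : Claim_equal_checkStr := by
  intro str_ i j _hDom hPre
  obtain ⟨h1, h2⟩ := hPre
  show checkStr str_ i j = checkStr_alt str_ i j
  unfold checkStr checkStr_alt
  by_cases hij : i < j
  · obtain ⟨hi, hjlen⟩ := h1 hij
    have hj : (0:Int) ≤ j := by omega
    rw [PySem.List.slice_toNat _ hi (by omega)]
    exact loop_eq_slice_aux str_.toList (j - i).toNat i j rfl hi hj (fun _ => hjlen)
  · rw [checkStrLoop]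
    simp only [hij, dite_false]
    have hlen : (PySem.List.slice str_.toList (some i) (some (j + 1))).length ≤ 1 := by
      rw [PySem.List.length_slice, clampIdx_eval, clampIdx_eval]
      rcases h2 (by omega) with h | h | h | h <;> split_ifs <;> omega
    rw [if_pos (rev_short _ hlen)]
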